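-- pv_equiv track=rewrite | github.com/mousomer/tet4d | tetris_nd/playbot/planner_2d.py | _column_heights_holes
-- ===== SOURCE A (Python) =====
-- def _column_heights_holes(
--     cells: dict[tuple[int, int], int],
--     width: int,
--     height: int,
-- ) -> tuple[list[int], int]:
--     heights: list[int] = [0] * width
--     holes = 0
--     for x in range(width):
--         top_y: int | None = None
--         for y in range(height):
--             if (x, y) in cells:
--                 top_y = y
--                 break
--         if top_y is None:
--             continue
--         heights[x] = height - top_y
--         seen_block = False
--         for y in range(top_y, height):
--             occupied = (x, y) in cells
--             if occupied:
--                 seen_block = True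
--             elif seen_block:
--                 holes += 1
--     return heights, holes
-- ===== SOURCE B (Python) =====
-- def _column_heights_holes(
--     cells: dict,
--     width: int,
--     height: int,
-- ) -> tuple:
--     col_min: dict = {}
--     col_cnt: dict = {}
--     for (x, y) in cells:
--         if 0 <= y < height:
--             col_cnt[x] = col_cnt.get(x, 0) + 1
--             if x not in col_min or y < col_min[x]:
--                 col_min[x] = y
--     heights = []
--     holes = 0
--     for x in range(width):
--         top = col_min.get(x)
--         if top is None:
--             heights.append(0)
--         else:
--             heights.append(height - top)
--             holes += (height - top) - col_cnt[x]
--     return heights, holes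
-- ===== Notes on version B (the rewrite author's own statement) =====
-- stated objective: faster
-- what changed: Instead of probing every (x, y) grid position column by column (two scans of range(height) per column), B makes one pass over the occupied cells collecting per-column minimum y and cell count into dicts, then computes heights[x] = height - min_y and holes += (height - min_y) - count per column.
import Mathlib
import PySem

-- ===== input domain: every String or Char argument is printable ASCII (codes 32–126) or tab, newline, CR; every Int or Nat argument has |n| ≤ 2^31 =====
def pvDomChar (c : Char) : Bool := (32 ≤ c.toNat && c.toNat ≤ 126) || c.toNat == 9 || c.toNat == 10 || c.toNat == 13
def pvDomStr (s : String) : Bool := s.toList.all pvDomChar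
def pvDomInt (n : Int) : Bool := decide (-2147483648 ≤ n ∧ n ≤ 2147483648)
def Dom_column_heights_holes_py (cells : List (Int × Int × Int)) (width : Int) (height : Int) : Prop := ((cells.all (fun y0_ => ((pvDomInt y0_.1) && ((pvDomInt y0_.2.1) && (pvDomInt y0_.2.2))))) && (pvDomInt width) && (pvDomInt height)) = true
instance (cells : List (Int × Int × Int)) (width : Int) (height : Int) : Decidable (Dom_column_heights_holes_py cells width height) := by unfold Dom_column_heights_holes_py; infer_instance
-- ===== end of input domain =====

-- B replaces A's height-many probes per column by a single pass over the occupied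
-- cells that groups them per column (min y and count); same return value everywhere
-- (objective: faster).

-- ===== PORT A =====

-- '(x, y) in cells' — membership among the dict's keys
def chMem (cells : List (Int × Int × Int)) (x y : Int) : Bool :=
  cells.any (fun c => c.1 == x && c.2.1 == y)

-- A's inner search: 'top_y = None; for y in range(height): if (x, y) in cells: top_y = y; break'
def chTop (cells : List (Int × Int × Int)) (height x : Int) : Option Int :=
  (PySem.List.pyRange 0 height 1).find? (fun y => chMem cells x y)

-- body of A's 'for x in range(width)' loop, acting on the state (heights, holes)
def chStepA (cells : List (Int × Int × Int)) (height : Int)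
    (st : List Int × Int) (x : Int) : List Int × Int :=
  match chTop cells height x with
  | none => st                                    -- 'if top_y is None: continue'
  | some t =>
      let heights := PySem.List.pySetD st.1 x (height - t)  -- heights[x] = height - top_y
      -- 'seen_block = False; for y in range(top_y, height): …'
      let inner := (PySem.List.pyRange t height 1).foldl
        (fun (p : Bool × Int) y =>
          if chMem cells x y then (true, p.2)
          else if p.1 then (p.1, p.2 + 1) else p)
        (false, st.2)
      (heights, inner.2)

def column_heights_holes_py (cells : List (Int × Int × Int)) (width : Int) (height : Int) :
    List Int × Int :=
  -- heights = [0] * width; holes = 0; for x in range(width): …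
  (PySem.List.pyRange 0 width 1).foldl (chStepA cells height)
    (List.replicate width.toNat 0, 0)

-- ===== PORT B =====

-- body of B's first loop: fold one key (x, y) into (col_min, col_cnt)
def chStepB (height : Int) (p : PySem.Dict Int Int × PySem.Dict Int Int)
    (k : Int × Int) : PySem.Dict Int Int × PySem.Dict Int Int :=
  if 0 ≤ k.2 ∧ k.2 < height then
    let cnt := p.2.insert k.1 (p.2.getD k.1 0 + 1)       -- col_cnt[x] = col_cnt.get(x, 0) + 1
    let cmin :=
      match p.1.get? k.1 with                            -- 'if x not in col_min or y < col_min[x]'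
      | none => p.1.insert k.1 k.2
      | some m => if k.2 < m then p.1.insert k.1 k.2 else p.1
    (cmin, cnt)
  else p

-- body of B's second loop ('for x in range(width)'); col_cnt[x] is ported as getD _ 0,
-- exact because B reads col_cnt[x] only when x ∈ col_min, and then x ∈ col_cnt too
def chStepB2 (cm : PySem.Dict Int Int × PySem.Dict Int Int) (height : Int)
    (st : List Int × Int) (x : Int) : List Int × Int :=
  match cm.1.get? x with
  | none => (st.1 ++ [0], st.2)
  | some t => (st.1 ++ [height - t], st.2 + ((height - t) - cm.2.getD x 0))

def column_heights_holes_py_alt (cells : List (Int × Int × Int)) (width : Int) (height : Int) :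
    List Int × Int :=
  -- 'for (x, y) in cells' iterates the dict's (distinct) keys in insertion order
  let keys := PySem.List.dedup (cells.map (fun c => (c.1, c.2.1)))
  let cm := keys.foldl (chStepB height) (PySem.Dict.empty, PySem.Dict.empty)
  (PySem.List.pyRange 0 width 1).foldl (chStepB2 cm height) ([], 0)

-- ===== PRECONDITION & SPEC =====
def Spec_column_heights_holes_py (cells : List (Int × Int × Int)) (width : Int) (height : Int) (out : List Int × Int) : Prop := out = column_heights_holes_py_alt cells width height
instance (cells : List (Int × Int × Int)) (width : Int) (height : Int) (out : List Int × Int) : Decidable (Spec_column_heights_holes_py cells width height out) := by unfold Spec_column_heights_holes_py; infer_instance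

-- ===== CLAIM (what is proved, stated in full; the proofs are below) =====
def Claim_equal_column_heights_holes_py : Prop := ∀ (cells : List (Int × Int × Int)) (width : Int) (height : Int), Dom_column_heights_holes_py cells width height → Spec_column_heights_holes_py cells width height (column_heights_holes_py cells width height)

-- ===== LEMMAS AND PROOFS =====

-- the dict's key list, deduplicated (what B iterates over)
def chKeys (cells : List (Int × Int × Int)) : List (Int × Int) :=
  PySem.List.dedup (cells.map (fun c => (c.1, c.2.1)))

def chPred (height x : Int) (k : Int × Int) : Bool :=
  k.1 == x && decide (0 ≤ k.2 ∧ k.2 < height)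

-- the occupied rows of column x that lie inside the board, as B's first loop sees them
def chYs (cells : List (Int × Int × Int)) (height x : Int) : List Int :=
  ((chKeys cells).filter (chPred height x)).map Prod.snd

-- min-accumulator of B's first loop, as a function on Option
def chOmin (o : Option Int) (y : Int) : Option Int :=
  match o with
  | none => some y
  | some m => if y < m then some y else some m

def chF (cells : List (Int × Int × Int)) (height x : Int) : Int :=
  match chTop cells height x with
  | none => 0
  | some t => height - t

def chD (cells : List (Int × Int × Int)) (height x : Int) : Int :=
  match chTop cells height x with
  | none => 0
  | some t => ((PySem.List.pyRange (t + 1) height 1).countP (fun y => !chMem cells x y) : Int)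

def chG (cm : PySem.Dict Int Int × PySem.Dict Int Int) (height x : Int) : Int :=
  match cm.1.get? x with
  | none => 0
  | some t => height - t

def chE (cm : PySem.Dict Int Int × PySem.Dict Int Int) (height x : Int) : Int :=
  match cm.1.get? x with
  | none => 0
  | some t => (height - t) - cm.2.getD x 0

theorem chMem_iff (cells : List (Int × Int × Int)) (x y : Int) :
    chMem cells x y = true ↔ (x, y) ∈ chKeys cells := by
  simp [chMem, chKeys, List.any_eq_true, List.mem_map, Prod.ext_iff]

theorem mem_chYs (cells : List (Int × Int × Int)) (h x y : Int) :
    y ∈ chYs cells h x ↔ ((x, y) ∈ chKeys cells ∧ 0 ≤ y ∧ y < h) := by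
  simp only [chYs, chPred, List.mem_map, List.mem_filter, Bool.and_eq_true, beq_iff_eq,
    decide_eq_true_eq]
  constructor
  · rintro ⟨⟨a, b⟩, ⟨hk, rfl, hb⟩, rfl⟩
    exact ⟨hk, hb⟩
  · rintro ⟨hk, hy⟩
    exact ⟨(x, y), ⟨hk, rfl, hy⟩, rfl⟩

theorem nodup_chYs (cells : List (Int × Int × Int)) (h x : Int) :
    (chYs cells h x).Nodup := by
  have hf : ((chKeys cells).filter (chPred h x)).Nodup :=
    (PySem.List.nodup_dedup _).filter _
  refine List.Nodup.map_on ?_ hf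
  rintro ⟨a1, a2⟩ ha ⟨b1, b2⟩ hb hab
  have ha1 : a1 = x := by
    have := List.of_mem_filter ha
    simp [chPred] at this
    exact this.1
  have hb1 : b1 = x := by
    have := List.of_mem_filter hb
    simp [chPred] at this
    exact this.1
  simp_all

theorem chB_cnt (h : Int) (K : List (Int × Int)) (m c : PySem.Dict Int Int) (x : Int) :
    ((K.foldl (chStepB h) (m, c)).2).getD x 0
      = c.getD x 0 + ((K.filter (chPred h x)).length : Int) := by
  induction K generalizing m c with
  | nil => simp
  | cons k K ih =>
    rcases k with ⟨k1, k2⟩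
    simp only [List.foldl_cons, chStepB, List.filter_cons]
    by_cases hc : 0 ≤ k2 ∧ k2 < h
    · rw [if_pos hc]
      by_cases hx : k1 = x
      · subst hx
        rw [if_pos (show chPred h k1 (k1, k2) = true by simp [chPred, hc])]
        rw [ih]
        rw [PySem.Dict.getD_insert, if_pos rfl]
        simp only [List.length_cons]
        push_cast
        omega
      · rw [if_neg (show ¬ chPred h x (k1, k2) = true by simp [chPred, hx])]
        rw [ih]
        rw [PySem.Dict.getD_insert, if_neg (fun hh => hx hh.symm)]
    · rw [if_neg hc]
      rw [if_neg (show ¬ chPred h x (k1, k2) = true by simp [chPred, hc])]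
      exact ih m c

theorem chB_min (h : Int) (K : List (Int × Int)) (m c : PySem.Dict Int Int) (x : Int) :
    ((K.foldl (chStepB h) (m, c)).1).get? x
      = ((K.filter (chPred h x)).map Prod.snd).foldl chOmin (m.get? x) := by
  induction K generalizing m c with
  | nil => simp
  | cons k K ih =>
    rcases k with ⟨k1, k2⟩
    simp only [List.foldl_cons, chStepB, List.filter_cons]
    by_cases hc : 0 ≤ k2 ∧ k2 < h
    · rw [if_pos hc]
      by_cases hx : k1 = x
      · subst hx
        rw [if_pos (show chPred h k1 (k1, k2) = true by simp [chPred, hc])]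
        simp only [List.map_cons, List.foldl_cons]
        cases hm : m.get? k1 with
        | none =>
          simp only [hm]
          rw [ih]
          simp [chOmin, PySem.Dict.get?_insert]
        | some mm =>
          simp only [hm]
          by_cases hlt : k2 < mm
          · rw [if_pos hlt, ih]
            rw [PySem.Dict.get?_insert, if_pos rfl]
            simp [chOmin, hlt]
          · rw [if_neg hlt, ih, hm]
            simp [chOmin, hlt]
      · rw [if_neg (show ¬ chPred h x (k1, k2) = true by simp [chPred, hx])]
        cases hm : m.get? k1 with
        | none =>
          simp only [hm]
          rw [ih]
          rw [PySem.Dict.get?_insert, if_neg (fun hh => hx hh.symm)]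
        | some mm =>
          simp only [hm]
          by_cases hlt : k2 < mm
          · rw [if_pos hlt, ih]
            rw [PySem.Dict.get?_insert, if_neg (fun hh => hx hh.symm)]
          · rw [if_neg hlt]
            exact ih m _
    · rw [if_neg hc]
      rw [if_neg (show ¬ chPred h x (k1, k2) = true by simp [chPred, hc])]
      exact ih m c

theorem foldl_chOmin_some (t : List Int) : ∀ a : Int,
    t.foldl chOmin (some a) = some (t.foldl min a) := by
  induction t with
  | nil => intro a; rfl
  | cons b t ih =>
    intro a
    have hob : chOmin (some a) b = some (min a b) := by
      simp only [chOmin]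
      by_cases hab : b < a
      · rw [if_pos hab, min_eq_right (le_of_lt hab)]
      · rw [if_neg hab, min_eq_left (not_lt.mp hab)]
    simp only [List.foldl_cons, hob, ih]

theorem foldl_chOmin_none (ys : List Int) : ys.foldl chOmin none = ys.min? := by
  cases ys with
  | nil => rfl
  | cons a t =>
    have h1 : chOmin none a = some a := rfl
    simp only [List.foldl_cons, h1, foldl_chOmin_some]
    rfl

theorem foldl_min_eq_self (t : List Int) : ∀ a : Int, (∀ b ∈ t, a ≤ b) → t.foldl min a = a := by
  induction t with
  | nil => intro a _; rfl
  | cons b t ih =>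
    intro a hb
    simp only [List.foldl_cons, min_eq_left (hb b (by simp))]
    exact ih a (fun c hc => hb c (by simp [hc]))

theorem head?_eq_min?_of_pairwise (l : List Int) (hl : l.Pairwise (· < ·)) :
    l.head? = l.min? := by
  cases l with
  | nil => rfl
  | cons a t =>
    have ht : ∀ b ∈ t, a ≤ b := fun b hb => le_of_lt ((List.pairwise_cons.mp hl).1 b hb)
    show some a = (a :: t).min?
    rw [List.min?_cons']
    rw [foldl_min_eq_self t a ht]

theorem chTop_eq_min? (cells : List (Int × Int × Int)) (h x : Int) :
    chTop cells h x = ((PySem.List.pyRange 0 h 1).filter (fun y => chMem cells x y)).min? := by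
  rw [chTop, ← List.head?_filter]
  exact head?_eq_min?_of_pairwise _ (List.Pairwise.filter _ (PySem.List.pairwise_lt_pyRange_one 0 h))

theorem min?_congr_mem (l l' : List Int) (hm : ∀ a, a ∈ l ↔ a ∈ l') :
    l.min? = l'.min? := by
  cases h1 : l.min? with
  | none =>
    rw [List.min?_eq_none_iff] at h1
    subst h1
    symm
    rw [List.min?_eq_none_iff]
    rw [List.eq_nil_iff_forall_not_mem]
    intro a ha
    exact (List.not_mem_nil (a := a)) ((hm a).mpr ha)
  | some a =>
    rw [List.min?_eq_some_iff] at h1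
    symm
    rw [List.min?_eq_some_iff]
    exact ⟨(hm a).mp h1.1, fun b hb => h1.2 b ((hm b).mpr hb)⟩

theorem chTop_eq_ysmin (cells : List (Int × Int × Int)) (h x : Int) :
    chTop cells h x = (chYs cells h x).min? := by
  rw [chTop_eq_min?]
  apply min?_congr_mem
  intro a
  simp only [List.mem_filter, PySem.List.mem_pyRange_one, mem_chYs, ← chMem_iff]
  tauto

theorem chYs_length_eq (cells : List (Int × Int × Int)) (h x : Int) :
    (chYs cells h x).length
      = ((PySem.List.pyRange 0 h 1).filter (fun y => chMem cells x y)).length := by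
  have h1 := nodup_chYs cells h x
  have h2 : ((PySem.List.pyRange 0 h 1).filter (fun y => chMem cells x y)).Nodup :=
    (PySem.List.nodup_pyRange_one 0 h).filter _
  rw [← List.toFinset_card_of_nodup h1, ← List.toFinset_card_of_nodup h2]
  congr 1
  ext a
  simp only [List.mem_toFinset, mem_chYs, List.mem_filter, PySem.List.mem_pyRange_one,
    ← chMem_iff]
  tauto

theorem chInner_seen (p : Int → Bool) (l : List Int) : ∀ h0 : Int,
    l.foldl (fun (q : Bool × Int) y =>
        if p y then (true, q.2) else if q.1 then (q.1, q.2 + 1) else q) (true, h0)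
      = (true, h0 + (l.countP (fun y => !p y) : Int)) := by
  induction l with
  | nil => intro h0; simp
  | cons a l ih =>
    intro h0
    simp only [List.foldl_cons, List.countP_cons]
    cases hp : p a with
    | true =>
      norm_num [ih]
    | false =>
      norm_num
      rw [ih]
      simp only [Prod.mk.injEq, true_and]
      omega

theorem chA_outer (cells : List (Int × Int × Int)) (h : Int) (w : Nat) :
    ∀ m : Nat, m ≤ w →
      (PySem.List.pyRange 0 (m : Int) 1).foldl (chStepA cells h) (List.replicate w 0, 0)
        = ((PySem.List.pyRange 0 (m : Int) 1).map (chF cells h) ++ List.replicate (w - m) 0,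
           ((PySem.List.pyRange 0 (m : Int) 1).map (chD cells h)).sum) := by
  intro m
  induction m with
  | zero =>
    intro _
    rw [PySem.List.pyRange_one_eq_nil (by omega)]
    simp
  | succ m ihm =>
    intro hm
    have hsr : PySem.List.pyRange 0 ((m + 1 : Nat) : Int) 1
        = PySem.List.pyRange 0 (m : Int) 1 ++ [(m : Int)] := by
      rw [show ((m + 1 : Nat) : Int) = (m : Int) + 1 by push_cast; ring]
      exact PySem.List.pyRange_one_succ_right (by omega)
    rw [hsr, List.foldl_append, List.map_append, List.map_append,
      ihm (Nat.le_of_succ_le hm)]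
    simp only [List.foldl_cons, List.foldl_nil, List.map_cons, List.map_nil,
      List.sum_append, List.sum_cons, List.sum_nil]
    have hrep : List.replicate (w - m) (0 : Int) = 0 :: List.replicate (w - (m + 1)) 0 := by
      rw [show w - m = (w - (m + 1)) + 1 by omega, List.replicate_succ]
    have hlen : ((PySem.List.pyRange 0 (m : Int) 1).map (chF cells h)).length = m := by
      simp [PySem.List.length_pyRange_one]
    cases ht : chTop cells h (m : Int) with
    | none =>
      rw [chStepA, ht]
      rw [hrep]
      simp [chF, chD, ht, List.append_assoc]
    | some t =>
      have hmem : t ∈ PySem.List.pyRange 0 h 1 := List.mem_of_find?_eq_some ht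
      have hth : 0 ≤ t ∧ t < h := (PySem.List.mem_pyRange_one).mp hmem
      have hpt : chMem cells (m : Int) t = true := by
        have := List.find?_some ht
        simpa using this
      rw [chStepA, ht]
      simp only
      rw [PySem.List.pyRange_one_cons hth.2, List.foldl_cons]
      rw [if_pos hpt]
      rw [chInner_seen]
      rw [PySem.List.pySetD_natCast, List.set_append_right _ _ (by rw [hlen])]
      rw [hlen, Nat.sub_self, hrep, List.set_cons_zero]
      simp only [Prod.mk.injEq]
      constructor
      · rw [chF, ht]
        simp [List.append_assoc]
      · rw [chD, ht]
        simp

theorem chB_outer (cm : PySem.Dict Int Int × PySem.Dict Int Int) (h : Int) (l : List Int) :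
    ∀ (hs0 : List Int) (a0 : Int),
      l.foldl (chStepB2 cm h) (hs0, a0)
        = (hs0 ++ l.map (chG cm h), a0 + (l.map (chE cm h)).sum) := by
  induction l with
  | nil => intro hs0 a0; simp
  | cons a l ih =>
    intro hs0 a0
    simp only [List.foldl_cons, chStepB2, List.map_cons, List.sum_cons]
    cases hg : cm.1.get? a with
    | none =>
      rw [ih]
      simp [chG, chE, hg, List.append_assoc]
    | some t =>
      rw [ih]
      simp only [chG, chE, hg, Prod.mk.injEq]
      refine ⟨by simp [List.append_assoc], by omega⟩

theorem cm_min_eq (cells : List (Int × Int × Int)) (h x : Int) :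
    (((chKeys cells).foldl (chStepB h) (PySem.Dict.empty, PySem.Dict.empty)).1).get? x
      = chTop cells h x := by
  rw [chB_min, PySem.Dict.get?_empty]
  rw [show ((chKeys cells).filter (chPred h x)).map Prod.snd = chYs cells h x from rfl]
  rw [foldl_chOmin_none, ← chTop_eq_ysmin]

theorem cm_cnt_eq (cells : List (Int × Int × Int)) (h x : Int) :
    (((chKeys cells).foldl (chStepB h) (PySem.Dict.empty, PySem.Dict.empty)).2).getD x 0
      = ((chYs cells h x).length : Int) := by
  rw [chB_cnt, PySem.Dict.getD_empty]
  simp [chYs]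

theorem chG_eq_chF (cells : List (Int × Int × Int)) (h x : Int) :
    chG ((chKeys cells).foldl (chStepB h) (PySem.Dict.empty, PySem.Dict.empty)) h x
      = chF cells h x := by
  rw [chG, chF, cm_min_eq]

theorem chE_eq_chD (cells : List (Int × Int × Int)) (h x : Int) :
    chE ((chKeys cells).foldl (chStepB h) (PySem.Dict.empty, PySem.Dict.empty)) h x
      = chD cells h x := by
  rw [chE, chD, cm_min_eq, cm_cnt_eq]
  cases ht : chTop cells h x with
  | none => rfl
  | some t =>
    have hmin : (chYs cells h x).min? = some t := by rw [← chTop_eq_ysmin, ht]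
    rw [List.min?_eq_some_iff] at hmin
    obtain ⟨hmem, hlb⟩ := hmin
    have hty := (mem_chYs cells h x t).mp hmem
    have hth : 0 ≤ t ∧ t < h := hty.2
    have hpt : chMem cells x t = true := (chMem_iff cells x t).mpr hty.1
    -- split the filtered range at t
    have hsplit : (PySem.List.pyRange 0 h 1).filter (fun y => chMem cells x y)
        = ((PySem.List.pyRange 0 t 1).filter (fun y => chMem cells x y))
          ++ ((PySem.List.pyRange t h 1).filter (fun y => chMem cells x y)) := by
      rw [← List.filter_append, ← PySem.List.pyRange_one_append 0 t h hth.1 (le_of_lt hth.2)]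
    have hnil : (PySem.List.pyRange 0 t 1).filter (fun y => chMem cells x y) = [] := by
      rw [List.filter_eq_nil_iff]
      intro y hy
      have hyr := (PySem.List.mem_pyRange_one).mp hy
      intro hp
      have : y ∈ chYs cells h x := by
        rw [mem_chYs]
        exact ⟨(chMem_iff cells x y).mp hp, hyr.1, by omega⟩
      have := hlb y this
      omega
    have hcons : (PySem.List.pyRange t h 1).filter (fun y => chMem cells x y)
        = t :: (PySem.List.pyRange (t + 1) h 1).filter (fun y => chMem cells x y) := by
      rw [PySem.List.pyRange_one_cons hth.2, List.filter_cons, if_pos hpt]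
    have hlenys : (chYs cells h x).length
        = 1 + (PySem.List.pyRange (t + 1) h 1).countP (fun y => chMem cells x y) := by
      rw [chYs_length_eq, hsplit, hnil, hcons]
      simp [List.countP_eq_length_filter]
      omega
    have hcnt : (PySem.List.pyRange (t + 1) h 1).length
        = (PySem.List.pyRange (t + 1) h 1).countP (fun y => chMem cells x y)
          + (PySem.List.pyRange (t + 1) h 1).countP (fun y => !chMem cells x y) := by
      rw [List.length_eq_countP_add_countP (p := fun y => chMem cells x y)]
      congr 1
      apply List.countP_congr
      intro a _
      cases chMem cells x a <;> simp
    have hlenrest : (((PySem.List.pyRange (t + 1) h 1).length : Nat) : Int) = h - t - 1 := by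
      rw [PySem.List.length_pyRange_one]
      rw [Int.toNat_of_nonneg (by omega)]
      omega
    rw [hlenys]
    push_cast
    push_cast at hlenrest
    omega

theorem main_eq (cells : List (Int × Int × Int)) (width height : Int) :
    column_heights_holes_py cells width height
      = column_heights_holes_py_alt cells width height := by
  unfold column_heights_holes_py column_heights_holes_py_alt
  rw [show PySem.List.dedup (cells.map (fun c => (c.1, c.2.1))) = chKeys cells from rfl]
  rw [chB_outer]
  by_cases hw : 0 ≤ width
  · obtain ⟨n, hn⟩ : ∃ n : Nat, width = (n : Int) := ⟨width.toNat, (Int.toNat_of_nonneg hw).symm⟩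
    subst hn
    rw [show ((n : Int)).toNat = n from Int.toNat_natCast n]
    rw [chA_outer cells height n n (le_refl n)]
    rw [Nat.sub_self, List.replicate_zero, List.append_nil, List.nil_append, zero_add]
    simp only [Prod.mk.injEq]
    constructor
    · apply List.map_congr_left
      intro a _
      exact (chG_eq_chF cells height a).symm
    · congr 1
      apply List.map_congr_left
      intro a _
      exact (chE_eq_chD cells height a).symm
  · have h1 : PySem.List.pyRange 0 width 1 = [] := PySem.List.pyRange_one_eq_nil (by omega)
    have h2 : width.toNat = 0 := by omega
    rw [h1, h2]
    simp

-- ===== VERDICT (by name: the statement is the Claim_ definition above) =====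
theorem column_heights_holes_py_spec : Claim_equal_column_heights_holes_py := by
  intro cells width height _
  unfold Spec_column_heights_holes_py
  exact main_eq cells width height
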